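-- pv_equiv track=rewrite | github.com/rberenguel/stackmemo | stackmemo/main.py | colorify
-- ===== SOURCE A (Python) =====
-- def colorify(txt):
--     opened = False
--     new_text = []
--     for c in txt:
--         if c == "_":
--             opened = not opened
--             if opened:
--                 new_text.append("#003399 ")
--             else:
--                 new_text.append("#")
--         elif c == "*":
--             opened = not opened
--             if opened:
--                 new_text.append("#009933 ")
--             else:
--                 new_text.append("#")
--         elif c == "`":
--             opened = not opened
--             if opened:
--                 new_text.append("#993300 ")
--             else:
--                 new_text.append("#")
--         else:
--             new_text.append(c)
--     return "".join(new_text)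
-- ===== SOURCE B (Python) =====
-- MARKS = {"_": "#003399 ", "*": "#009933 ", "`": "#993300 "}
--
--
-- def _go(rest, k):
--     # scan for the next marker; emit the plain prefix, the replacement, recurse on the tail
--     for j, c in enumerate(rest):
--         if c in MARKS:
--             rep = MARKS[c] if k % 2 == 0 else "#"
--             return rest[:j] + rep + _go(rest[j + 1:], k + 1)
--     return rest
--
--
-- def colorify(txt):
--     return _go(txt, 0)
-- ===== Notes on version B (the rewrite author's own statement) =====
-- stated objective: alternative
-- what changed: Replaces the per-character branch ladder with a shared open/close flag by a recursive marker-to-marker scan: find the next marker, copy the plain slice before it wholesale, pick the replacement from a parity counter and a color dict, and recurse on the tail.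
import Mathlib
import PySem

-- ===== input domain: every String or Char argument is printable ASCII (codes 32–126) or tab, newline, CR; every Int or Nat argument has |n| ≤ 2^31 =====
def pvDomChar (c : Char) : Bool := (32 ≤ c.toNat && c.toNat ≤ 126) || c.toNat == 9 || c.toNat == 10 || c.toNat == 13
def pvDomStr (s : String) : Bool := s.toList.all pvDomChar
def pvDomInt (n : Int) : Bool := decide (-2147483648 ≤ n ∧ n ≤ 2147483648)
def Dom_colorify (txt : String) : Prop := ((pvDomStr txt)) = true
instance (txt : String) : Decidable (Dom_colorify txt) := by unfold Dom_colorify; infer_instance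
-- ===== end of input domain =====

-- B replaces A's per-character loop with a shared toggle by a recursive marker-to-marker
-- scan (copy the plain slice, emit color/'#' from a parity counter, recurse); objective: alternative.

-- ===== PORT A =====
-- one step of A's for-loop: state = (opened, list of appended strings)
def colorifyStep (st : Bool × List String) (c : Char) : Bool × List String :=
  if c = '_' then
    let opened := !st.1
    (opened, st.2 ++ [if opened then "#003399 " else "#"])
  else if c = '*' then
    let opened := !st.1
    (opened, st.2 ++ [if opened then "#009933 " else "#"])
  else if c = '`' then
    let opened := !st.1
    (opened, st.2 ++ [if opened then "#993300 " else "#"])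
  else
    (st.1, st.2 ++ [String.ofList [c]])

def colorify (txt : String) : String :=
  String.join (txt.toList.foldl colorifyStep (false, [])).2

-- ===== PORT B =====
-- membership in MARKS
def isMark (c : Char) : Bool := c = '_' || c = '*' || c = '`'

-- MARKS[c]
def markColor (c : Char) : String :=
  if c = '_' then "#003399 " else if c = '*' then "#009933 " else "#993300 "

-- the recursive helper _go of Source B: find the next marker (the enumerate scan),
-- copy rest[:j], emit the replacement, recurse on rest[j+1:]
def colorifyGo (cs : List Char) (k : Nat) : List Char :=
  match h : cs.findIdx? isMark with
  | none => cs
  | some j =>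
      cs.take j
        ++ (if k % 2 = 0 then (markColor (cs.getD j ' ')).toList else ['#'])
        ++ colorifyGo (cs.drop (j + 1)) (k + 1)
termination_by cs.length
decreasing_by
  have hj : j < cs.length := (List.findIdx?_eq_some_iff_findIdx_eq.mp h).1
  simp [List.length_drop]; omega

def colorify_alt (txt : String) : String := String.ofList (colorifyGo txt.toList 0)

-- ===== PRECONDITION & SPEC =====
def Spec_colorify (txt : String) (out : String) : Prop := out = colorify_alt txt
instance (txt : String) (out : String) : Decidable (Spec_colorify txt out) := by unfold Spec_colorify; infer_instance

-- ===== CLAIM (what is proved, stated in full; the proofs are below) =====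
def Claim_equal_colorify : Prop := ∀ (txt : String), Dom_colorify txt → Spec_colorify txt (colorify txt)

-- ===== LEMMAS AND PROOFS =====

-- common reference: structural one-pass recursion with the boolean toggle
def specF : List Char → Bool → List Char
  | [], _ => []
  | c :: cs, op =>
      if isMark c then
        if !op then (markColor c).toList ++ specF cs true
        else '#' :: specF cs false
      else c :: specF cs op

theorem join_snoc (l : List String) (s : String) :
    String.join (l ++ [s]) = String.join l ++ s := by
  simp [String.join, List.foldl_append]

theorem A_fold (cs : List Char) : ∀ (op : Bool) (acc : List String),
    (String.join (cs.foldl colorifyStep (op, acc)).2).toList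
      = (String.join acc).toList ++ specF cs op := by
  induction cs with
  | nil => intro op acc; simp [specF]
  | cons c cs ih =>
    intro op acc
    by_cases h1 : c = '_'
    · subst h1
      cases op <;>
        simp [colorifyStep, specF, isMark, markColor, ih, join_snoc, String.toList_append]
    · by_cases h2 : c = '*'
      · subst h2
        cases op <;>
          simp [colorifyStep, specF, isMark, markColor, ih, join_snoc, String.toList_append]
      · by_cases h3 : c = '`'
        · subst h3
          cases op <;>
            simp [colorifyStep, specF, isMark, markColor, ih, join_snoc, String.toList_append]
        · simp [colorifyStep, specF, isMark, h1, h2, h3, ih, join_snoc, String.toList_append]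

theorem specF_no_mark (cs : List Char) (h : ∀ c ∈ cs, isMark c = false) (op : Bool) :
    specF cs op = cs := by
  induction cs with
  | nil => rfl
  | cons c cs ih =>
    simp [specF, h c (by simp)]
    exact ih (fun d hd => h d (by simp [hd]))

theorem specF_append_no_mark (seg : List Char) (h : ∀ c ∈ seg, isMark c = false)
    (rest : List Char) (op : Bool) :
    specF (seg ++ rest) op = seg ++ specF rest op := by
  induction seg with
  | nil => rfl
  | cons c seg ih =>
    simp [specF, h c (by simp)]
    exact ih (fun d hd => h d (by simp [hd]))

theorem B_eq_specF (cs : List Char) (k : Nat) :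
    colorifyGo cs k = specF cs (decide (k % 2 = 1)) := by
  rw [colorifyGo]
  cases h : cs.findIdx? isMark with
  | none =>
    exact (specF_no_mark cs (by simpa using List.findIdx?_eq_none_iff.mp h) _).symm
  | some j =>
    obtain ⟨hj, hfi⟩ := List.findIdx?_eq_some_iff_findIdx_eq.mp h
    have hmark : isMark cs[j] = true := by
      have := @List.findIdx_getElem _ isMark cs (by omega)
      simpa [hfi] using this
    have hseg : ∀ c ∈ cs.take j, isMark c = false := by
      intro c hc
      obtain ⟨i, hi, rfl⟩ := List.getElem_of_mem hc
      have hij : i < j := (by simpa using hi : i < j ∧ i < cs.length).1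
      have := @List.not_of_lt_findIdx _ isMark cs i (by omega)
      simpa [List.getElem_take] using this
    have hdecomp : cs = cs.take j ++ cs[j] :: cs.drop (j + 1) := by
      conv_lhs => rw [← List.take_append_drop j cs]
      rw [List.drop_eq_getElem_cons hj]
    have ih := B_eq_specF (cs.drop (j + 1)) (k + 1)
    conv_rhs => rw [hdecomp]
    rw [specF_append_no_mark _ hseg]
    have hgetD : cs[j]?.getD ' ' = cs[j] := by simp [List.getElem?_eq_getElem hj]
    rcases Nat.mod_two_eq_zero_or_one k with hk | hk
    · have hk1 : (k + 1) % 2 = 1 := by omega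
      simp [specF, hmark, hk, hk1, ih, hgetD]
    · have hk1 : (k + 1) % 2 = 0 := by omega
      simp [specF, hmark, hk, hk1, ih]
termination_by cs.length
decreasing_by simp [List.length_drop]; omega

-- ===== VERDICT (by name: the statement is the Claim_ definition above) =====
theorem colorify_spec : Claim_equal_colorify := by
  intro txt _
  unfold Spec_colorify colorify colorify_alt
  have hA := A_fold txt.toList false []
  have hB := B_eq_specF txt.toList 0
  have h : (String.join (txt.toList.foldl colorifyStep (false, [])).2).toList
      = (String.ofList (colorifyGo txt.toList 0)).toList := by
    rw [hA, hB]; simp [String.join]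
  exact String.toList_inj.mp h
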